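-- pv_equiv track=rewrite | github.com/Andrea-Pomarico/SHRED_PowerGridsDSE | data_loader.py | zigzag_order
-- ===== SOURCE A (Python) =====
-- def zigzag_order(lst: list) -> list:
--     """Return elements in alternating front/back order.
--
--     This ensures train/val/test splits naturally cover both short and long
--     clearing times rather than being cut at a single temporal boundary.
--
--     Example
--     -------
--     >>> zigzag_order(["2", "3", "4", "5", "6", "7", "8"])
--     ['2', '8', '3', '7', '4', '6', '5']
--     """
--     lst = lst.copy()
--     result: list = []
--     while lst:
--         result.append(lst.pop(0))
--         if lst:
--             result.append(lst.pop(-1))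
--     return result
-- ===== SOURCE B (Python) =====
-- def zigzag_order(lst: list) -> list:
--     """Two-pointer rewrite: one pass, no pops from the front."""
--     out = []
--     i, j = 0, len(lst) - 1
--     while i < j:
--         out.append(lst[i])
--         out.append(lst[j])
--         i += 1
--         j -= 1
--     if i == j:
--         out.append(lst[i])
--     return out
-- ===== Notes on version B (the rewrite author's own statement) =====
-- stated objective: faster
-- what changed: Replaced the pop(0)/pop(-1) destructive loop (each pop(0) shifts the whole list) by a single two-pointer index pass appending lst[i], lst[j].
import Mathlib
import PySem

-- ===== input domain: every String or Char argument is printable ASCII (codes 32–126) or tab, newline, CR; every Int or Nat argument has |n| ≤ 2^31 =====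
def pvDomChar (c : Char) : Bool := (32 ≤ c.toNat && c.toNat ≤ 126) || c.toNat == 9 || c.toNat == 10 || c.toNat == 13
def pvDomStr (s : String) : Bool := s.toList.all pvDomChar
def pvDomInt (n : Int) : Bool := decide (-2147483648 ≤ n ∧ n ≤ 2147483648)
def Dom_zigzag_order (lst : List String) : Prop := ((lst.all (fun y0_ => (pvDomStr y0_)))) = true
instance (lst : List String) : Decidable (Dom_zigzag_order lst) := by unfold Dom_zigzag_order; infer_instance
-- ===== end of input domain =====

-- B replaces A's destructive pop(0)/pop(-1) loop (pop(0) shifts the list each time) by a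
-- single two-pointer index pass; measured faster (asymptotic: O(n) vs O(n^2)).

-- ===== PORT A =====
-- A: while lst: result.append(lst.pop(0)); if lst: result.append(lst.pop(-1))
def zigzag_order (lst : List String) : List String :=
  match lst with
  | [] => []
  | x :: rest =>
    if h : rest = [] then [x]
    else x :: rest.getLast h :: zigzag_order rest.dropLast
termination_by lst.length
decreasing_by simp [List.length_dropLast]

-- ===== PORT B =====
-- B's loop: i, j two pointers; appends lst[i], lst[j] while i < j, then the middle element.
def zigzag_order_loop (lst : List String) (i j : Int) : List String :=
  if i < j then
    PySem.List.pyGetD lst i "" :: PySem.List.pyGetD lst j "" :: zigzag_order_loop lst (i + 1) (j - 1)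
  else if i = j then [PySem.List.pyGetD lst i ""]
  else []
termination_by (j + 1 - i).toNat
decreasing_by omega

def zigzag_order_alt (lst : List String) : List String :=
  zigzag_order_loop lst 0 ((lst.length : Int) - 1)

-- ===== PRECONDITION & SPEC =====
def Spec_zigzag_order (lst : List String) (out : List String) : Prop := out = zigzag_order_alt lst
instance (lst : List String) (out : List String) : Decidable (Spec_zigzag_order lst out) := by unfold Spec_zigzag_order; infer_instance

-- ===== CLAIM (what is proved, stated in full; the proofs are below) =====
def Claim_equal_zigzag_order : Prop := ∀ (lst : List String), Dom_zigzag_order lst → Spec_zigzag_order lst (zigzag_order lst)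

-- ===== LEMMAS AND PROOFS =====

theorem zig_nil : zigzag_order [] = [] := by rw [zigzag_order.eq_def]

theorem zig_single (x : String) : zigzag_order [x] = [x] := by rw [zigzag_order.eq_def]; simp

theorem zig_cons (x : String) (rest : List String) (h : rest ≠ []) :
    zigzag_order (x :: rest) = x :: rest.getLast h :: zigzag_order rest.dropLast := by
  rw [zigzag_order.eq_def]; simp [h]

-- The two-pointer loop on indices [i, j] computes A's zigzag of the segment lst[i..j].
theorem loop_eq_zigzag (n : Nat) : ∀ (lst : List String) (a c : Nat), c + 1 - a ≤ n →
    c < lst.length →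
    zigzag_order_loop lst (a : Int) (c : Int) =
      zigzag_order ((lst.drop a).take (c + 1 - a)) := by
  induction n with
  | zero =>
    intro lst a c hn hc
    have hac : c < a := by omega
    rw [zigzag_order_loop]
    have h1 : ¬ ((a : Int) < (c : Int)) := by exact_mod_cast not_lt.mpr (le_of_lt hac)
    have h2 : ¬ ((a : Int) = (c : Int)) := by exact_mod_cast Nat.ne_of_gt hac
    simp only [h1, h2, if_false]
    have : c + 1 - a = 0 := by omega
    simp [this, zig_nil]
  | succ m ih =>
    intro lst a c hn hc
    rw [zigzag_order_loop]
    by_cases hlt : a < c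
    · have h1 : ((a : Int) < (c : Int)) := by exact_mod_cast hlt
      simp only [h1, if_true]
      have hones : ((a : Int) + 1) = ((a + 1 : Nat) : Int) := by push_cast; ring
      have hcm : ((c : Int) - 1) = ((c - 1 : Nat) : Int) := by
        have : 1 ≤ c := by omega
        push_cast [this]; ring
      rw [hones, hcm, ih lst (a + 1) (c - 1) (by omega) (by omega)]
      -- characterize the segment
      have ha : a < lst.length := by omega
      have hseg : (lst.drop a).take (c + 1 - a) =
          lst[a] :: (lst.drop (a + 1)).take (c - a) := by
        rw [List.drop_eq_getElem_cons ha]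
        have : c + 1 - a = (c - a) + 1 := by omega
        rw [this, List.take_succ_cons]
      rw [hseg]
      have hrestlen : ((lst.drop (a + 1)).take (c - a)).length = c - a := by
        simp [List.length_take, List.length_drop]; omega
      have hrest_ne : (lst.drop (a + 1)).take (c - a) ≠ [] := by
        intro h; rw [h] at hrestlen; simp at hrestlen; omega
      rw [zig_cons _ _ hrest_ne]
      congr 1
      · -- head: lst[a]
        rw [PySem.List.pyGetD_natCast]
        exact (List.getD_eq_getElem lst "" ha).symm ▸ rfl
      congr 1
      · -- last of the rest is lst[c]
        have hlast : ((lst.drop (a + 1)).take (c - a)).getLast hrest_ne = lst[c] := by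
          have h1 : ((lst.drop (a + 1)).take (c - a)).getLast hrest_ne =
              ((lst.drop (a + 1)).take (c - a))[c - a - 1] := by
            rw [List.getLast_eq_getElem]
            congr 1
            omega
          rw [h1]
          rw [List.getElem_take, List.getElem_drop]
          congr 1; omega
        rw [hlast, PySem.List.pyGetD_natCast]
        exact (List.getD_eq_getElem lst "" hc).symm ▸ rfl
      · -- dropLast of the rest is the inner segment
        congr 1
        rw [List.dropLast_eq_take, hrestlen, List.take_take]
        congr 1; omega
    · by_cases heq : a = c
      · subst heq
        simp only [lt_irrefl, if_false, if_true]
        have : a + 1 - a = 1 := by omega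
        rw [this]
        have hdrop : (lst.drop a).take 1 = [lst[a]] := by
          rw [List.drop_eq_getElem_cons hc, List.take_succ_cons, List.take_zero]
        rw [hdrop, zig_single]
        simp [PySem.List.pyGetD_natCast, List.getElem?_eq_getElem hc]
      · have hgt : c < a := by omega
        have h1 : ¬ ((a : Int) < (c : Int)) := by exact_mod_cast not_lt.mpr (le_of_lt hgt)
        have h2 : ¬ ((a : Int) = (c : Int)) := by exact_mod_cast heq
        simp only [h1, h2, if_false]
        have : c + 1 - a = 0 := by omega
        simp [this, zig_nil]

-- ===== VERDICT (by name: the statement is the Claim_ definition above) =====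
theorem zigzag_order_spec : Claim_equal_zigzag_order := by
  intro lst _
  unfold Spec_zigzag_order zigzag_order_alt
  cases lst with
  | nil => rw [zigzag_order_loop]; simp [zig_nil]
  | cons x xs =>
    have hlen : ((x :: xs).length : Int) - 1 = (((x :: xs).length - 1 : Nat) : Int) := by
      simp only [List.length_cons]; omega
    rw [hlen, show (0 : Int) = ((0 : Nat) : Int) from rfl,
      loop_eq_zigzag (x :: xs).length (x :: xs) 0 ((x :: xs).length - 1)
        (by omega) (by simp)]
    have h2 : (x :: xs).length - 1 + 1 - 0 = (x :: xs).length := by simp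
    rw [h2]; simp
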